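-- pv_equiv track=rewrite | github.com/jrodriguez-1/jose_challenges | letter_spacing.py | letter_spacing
-- ===== SOURCE A (Python) =====
-- def letter_spacing(input_string, first_char, second_char, desired_spacing_value):
--     my_arr = []
--     count = 0
--     f_index = input_string.index(first_char)
--     s_index = input_string.index(second_char)
--     for i in range(f_index,s_index):
--         if i != s_index - 1:
--             count += 1
--         else:
--             break
--     if count == desired_spacing_value:
--         return [f_index,s_index]
--     else:
--         return None
-- ===== SOURCE B (Python) =====
-- def letter_spacing(input_string, first_char, second_char, desired_spacing_value):
--     f_index = input_string.index(first_char)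
--     s_index = input_string.index(second_char)
--     spacing = s_index - f_index - 1 if s_index > f_index else 0
--     return [f_index, s_index] if spacing == desired_spacing_value else None
-- ===== Notes on version B (the rewrite author's own statement) =====
-- stated objective: simpler
-- what changed: Replaced the counting loop (which iterates from f_index and breaks just before s_index) by the closed-form spacing s_index - f_index - 1 clamped to 0, compared directly against the desired value.
import Mathlib
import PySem

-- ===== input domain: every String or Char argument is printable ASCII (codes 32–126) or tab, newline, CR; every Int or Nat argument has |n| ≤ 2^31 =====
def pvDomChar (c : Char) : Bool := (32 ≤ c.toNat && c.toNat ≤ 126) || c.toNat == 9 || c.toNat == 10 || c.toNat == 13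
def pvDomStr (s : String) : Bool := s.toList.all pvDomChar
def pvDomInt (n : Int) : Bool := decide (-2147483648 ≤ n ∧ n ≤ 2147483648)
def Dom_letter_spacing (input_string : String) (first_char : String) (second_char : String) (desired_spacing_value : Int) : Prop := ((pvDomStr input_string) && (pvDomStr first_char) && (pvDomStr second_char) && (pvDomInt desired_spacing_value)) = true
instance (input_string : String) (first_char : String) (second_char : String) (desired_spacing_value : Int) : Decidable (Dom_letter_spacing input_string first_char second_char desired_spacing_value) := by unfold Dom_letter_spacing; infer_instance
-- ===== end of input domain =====

-- B replaces A's counting loop (count i from f_index, break just before s_index) by the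
-- closed-form spacing s_index - f_index - 1 clamped to 0: simpler, same return value.


-- ===== PORT A =====
-- A's for-loop with its break: walk range(f_index, s_index), incrementing count while i ≠ s_index - 1.
def lsLoopA (sIdx : Int) : List Int → Int → Int
  | [], count => count
  | i :: rest, count => if i ≠ sIdx - 1 then lsLoopA sIdx rest (count + 1) else count

def letter_spacing (input_string : String) (first_char : String) (second_char : String) (desired_spacing_value : Int) : Option (List Int) :=
  let f_index := PySem.Str.find input_string first_char   -- input_string.index(first_char); -1 only outside Pre_
  let s_index := PySem.Str.find input_string second_char
  let count := lsLoopA s_index (PySem.List.pyRange f_index s_index 1) 0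
  if count = desired_spacing_value then some [f_index, s_index] else none

-- ===== PORT B =====
def letter_spacing_alt (input_string : String) (first_char : String) (second_char : String) (desired_spacing_value : Int) : Option (List Int) :=
  let f_index := PySem.Str.find input_string first_char
  let s_index := PySem.Str.find input_string second_char
  let spacing := if s_index > f_index then s_index - f_index - 1 else 0
  if spacing = desired_spacing_value then some [f_index, s_index] else none

-- ===== PRECONDITION & SPEC =====
-- Pre_ excludes exactly the inputs where str.index raises ValueError (a char not occurring in the string).
def Pre_letter_spacing (input_string : String) (first_char : String) (second_char : String) (desired_spacing_value : Int) : Prop :=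
  PySem.Str.isIn first_char input_string = true ∧ PySem.Str.isIn second_char input_string = true
instance (input_string : String) (first_char : String) (second_char : String) (desired_spacing_value : Int) : Decidable (Pre_letter_spacing input_string first_char second_char desired_spacing_value) := by unfold Pre_letter_spacing; infer_instance

def pvWitness_letter_spacing : String × String × String × Int := ("abcd", "a", "c", 1)

def Spec_letter_spacing (input_string : String) (first_char : String) (second_char : String) (desired_spacing_value : Int) (out : Option (List Int)) : Prop := out = letter_spacing_alt input_string first_char second_char desired_spacing_value
instance (input_string : String) (first_char : String) (second_char : String) (desired_spacing_value : Int) (out : Option (List Int)) : Decidable (Spec_letter_spacing input_string first_char second_char desired_spacing_value out) := by unfold Spec_letter_spacing; infer_instance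

-- ===== CLAIM (what is proved, stated in full; the proofs are below) =====
def Claim_equal_letter_spacing : Prop := ∀ (input_string : String) (first_char : String) (second_char : String) (desired_spacing_value : Int), Dom_letter_spacing input_string first_char second_char desired_spacing_value → Pre_letter_spacing input_string first_char second_char desired_spacing_value → Spec_letter_spacing input_string first_char second_char desired_spacing_value (letter_spacing input_string first_char second_char desired_spacing_value)

-- ===== LEMMAS AND PROOFS =====
-- A's loop over range(f, s) computes s - f - 1 when f < s, and the accumulator unchanged otherwise.
theorem lsLoopA_closed (s : Int) (f c : Int) :
    lsLoopA s (PySem.List.pyRange f s 1) c = if f < s then c + (s - f - 1) else c := by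
  by_cases h : f < s
  · have hn : (s - f).toNat ≠ 0 := by omega
    generalize hk : (s - f).toNat = k at *
    induction k generalizing f c with
    | zero => omega
    | succ k ih =>
      rw [PySem.List.pyRange_one_cons h]
      by_cases hlast : f = s - 1
      · subst hlast
        have hstop : lsLoopA s ((s - 1) :: PySem.List.pyRange (s - 1 + 1) s 1) c = c := by
          simp [lsLoopA]
        rw [hstop, if_pos h]
        omega
      · have hne : f ≠ s - 1 := hlast
        simp only [lsLoopA, if_pos hne]
        by_cases hk0 : k = 0
        · omega
        · have h1 : f + 1 < s := by omega
          rw [ih (f + 1) (c + 1) h1 (by omega) (by omega)]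
          simp [if_pos h1]
          omega
  · have : PySem.List.pyRange f s 1 = [] := by
      have := PySem.List.length_pyRange_one f s
      have h0 : (PySem.List.pyRange f s 1).length = 0 := by omega
      exact List.length_eq_zero_iff.mp h0
    simp [this, lsLoopA, h]

-- ===== VERDICT (by name: the statement is the Claim_ definition above) =====
theorem letter_spacing_spec : Claim_equal_letter_spacing := by
  intro input_string first_char second_char d _ _
  unfold Spec_letter_spacing
  simp only [letter_spacing, letter_spacing_alt, lsLoopA_closed]
  split_ifs <;> first | rfl | omega
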